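-- pv_equiv track=rewrite | github.com/NVIDIA-NeMo/Gym | resources_servers/omniscience/app.py | parse_judge_grade
-- ===== SOURCE A (Python) =====
-- def parse_judge_grade(judge_text: str) -> str:
--     """Parse the single-letter grade (A/B/C/D) from the judge's response.
--
--     Returns "A", "B", "C", or "D". Falls back to "B" (INCORRECT) when the
--     output cannot be reliably parsed.
--     """
--     cleaned = judge_text.strip()
--     if cleaned in ("A", "B", "C", "D"):
--         return cleaned
--
--     last_line = cleaned.rsplit("\n", 1)[-1].strip()
--     for letter in ("A", "B", "C", "D"):
--         if last_line == letter:
--             return letter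
--
--     for letter in ("A", "B", "C", "D"):
--         if letter in cleaned:
--             return letter
--
--     return "B"
-- ===== SOURCE B (Python) =====
-- LETTERS = "ABCD"
--
--
-- def parse_judge_grade(judge_text: str) -> str:
--     cleaned = judge_text.strip()
--     last_line = cleaned[cleaned.rfind("\n") + 1:].strip()
--     for cand in (cleaned, last_line):
--         if len(cand) == 1 and cand in LETTERS:
--             return cand
--     present = {c for c in cleaned if c in LETTERS}
--     return min(present) if present else "B"
-- ===== Notes on version B (the rewrite author's own statement) =====
-- stated objective: idiomatic
-- what changed: B merges the two exact-match guards into a single loop over the pair (whole text, last line) tested by a length-1 membership check, extracts the last line with rfind instead of rsplit, and replaces the fallback's four independent substring scans by one character pass that builds the set of present letters and returns its minimum.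
import Mathlib
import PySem

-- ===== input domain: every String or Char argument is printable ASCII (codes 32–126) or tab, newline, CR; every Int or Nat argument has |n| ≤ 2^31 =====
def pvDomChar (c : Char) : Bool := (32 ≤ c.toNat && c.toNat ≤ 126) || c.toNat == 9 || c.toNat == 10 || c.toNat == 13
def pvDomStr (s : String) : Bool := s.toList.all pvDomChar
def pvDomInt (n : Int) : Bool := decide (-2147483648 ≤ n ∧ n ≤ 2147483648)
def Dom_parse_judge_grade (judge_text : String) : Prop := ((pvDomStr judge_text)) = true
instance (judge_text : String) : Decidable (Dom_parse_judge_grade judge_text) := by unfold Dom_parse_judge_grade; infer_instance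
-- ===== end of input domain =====

-- B merges the two exact-match guards into one loop, finds the last line via rfind, and
-- replaces A's four substring scans by a single character pass (set of present letters, min).

-- ===== PORT A =====
def parse_judge_grade (judge_text : String) : String :=
  let cleaned := PySem.Str.strip judge_text
  if cleaned == "A" || cleaned == "B" || cleaned == "C" || cleaned == "D" then cleaned
  else
    -- cleaned.rsplit("\n", 1)[-1]: rsplit is not in PySem; hand port, exact — the last piece
    -- is everything after the final '\n' (rfind), or the whole string when there is none.
    let i := PySem.Str.rfind cleaned "\n"
    let tail := if i == -1 then cleaned else PySem.Str.slice cleaned (some (i + 1)) none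
    let last_line := PySem.Str.strip tail
    match ["A", "B", "C", "D"].find? (fun letter => last_line == letter) with
    | some letter => letter
    | none =>
      match ["A", "B", "C", "D"].find? (fun letter => PySem.Str.isIn letter cleaned) with
      | some letter => letter
      | none => "B"

-- ===== PORT B =====
def pvLetters : String := "ABCD"

def parse_judge_grade_alt (judge_text : String) : String :=
  let cleaned := PySem.Str.strip judge_text
  let last_line := PySem.Str.strip
    (PySem.Str.slice cleaned (some (PySem.Str.rfind cleaned "\n" + 1)) none)
  match [cleaned, last_line].find?
      (fun cand => PySem.Str.len cand == 1 && PySem.Str.isIn cand pvLetters) with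
  | some cand => cand
  | none =>
    let present : PySem.Set Char :=
      PySem.Set.ofList (cleaned.toList.filter (fun c => PySem.Str.isIn (String.ofList [c]) pvLetters))
    match present.min? with
    | some c => String.ofList [c]
    | none => "B"

-- ===== PRECONDITION & SPEC =====
def Spec_parse_judge_grade (judge_text : String) (out : String) : Prop := out = parse_judge_grade_alt judge_text
instance (judge_text : String) (out : String) : Decidable (Spec_parse_judge_grade judge_text out) := by unfold Spec_parse_judge_grade; infer_instance

-- ===== CLAIM (what is proved, stated in full; the proofs are below) =====
def Claim_equal_parse_judge_grade : Prop := ∀ (judge_text : String), Dom_parse_judge_grade judge_text → Spec_parse_judge_grade judge_text (parse_judge_grade judge_text)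

-- ===== LEMMAS AND PROOFS =====

-- "t is exactly one of the four letters": A's tuple membership equals B's len-1-and-in test
lemma single_letter_eq (t : String) :
    (t == "A" || t == "B" || t == "C" || t == "D")
      = (PySem.Str.len t == 1 && PySem.Str.isIn t "ABCD") := by
  rw [Bool.eq_iff_iff]
  simp only [Bool.or_eq_true, beq_iff_eq, Bool.and_eq_true, PySem.Str.len_eq,
    PySem.Str.isIn_iff_infix, ← String.toList_inj, String.reduceToList, Nat.cast_eq_one]
  generalize t.toList = l
  match l with
  | [] => simp
  | [c] => simp [List.singleton_infix_iff]; tauto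
  | a :: b :: rest => simp [List.length]

-- A's phase-2 loop over the four letters returns last_line itself exactly when B's test fires
lemma phase2_eq (t : String) (X : String) :
    (match ["A", "B", "C", "D"].find? (fun letter => t == letter) with
     | some letter => letter
     | none => X)
      = if (PySem.Str.len t == 1 && PySem.Str.isIn t "ABCD") then t else X := by
  rw [← single_letter_eq]
  by_cases hA : t = "A"
  · subst hA; simp
  by_cases hB : t = "B"
  · subst hB; simp
  by_cases hC : t = "C"
  · subst hC; simp
  by_cases hD : t = "D"
  · subst hD; simp
  have a1 : (t == "A") = false := by simp [hA]
  have a2 : (t == "B") = false := by simp [hB]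
  have a3 : (t == "C") = false := by simp [hC]
  have a4 : (t == "D") = false := by simp [hD]
  simp [List.find?, a1, a2, a3, a4]

-- a one-character needle is in a haystack iff the character is
lemma isIn_single (c : Char) (l : List Char) :
    PySem.Chars.isIn [c] l = decide (c ∈ l) := by
  rw [Bool.eq_iff_iff]
  simp [PySem.Chars.isIn_iff_infix, List.singleton_infix_iff]

-- the min of B's set of present letters, characterised by which letters occur
lemma min_present (l : List Char) :
    (PySem.Set.ofList (l.filter (fun c => PySem.Chars.isIn [c] ['A','B','C','D']))).min? =
      (if 'A' ∈ l then some 'A' else if 'B' ∈ l then some 'B'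
       else if 'C' ∈ l then some 'C' else if 'D' ∈ l then some 'D' else none) := by
  have hmem : ∀ b, b ∈ (PySem.Set.ofList
      (l.filter (fun c => PySem.Chars.isIn [c] ['A','B','C','D']))) ↔
      (b ∈ (['A','B','C','D'] : List Char) ∧ b ∈ l) := by
    intro b
    rw [PySem.Set.mem_ofList, List.mem_filter, isIn_single]
    simp [and_comm]
  split_ifs with hA hB hC hD
  · rw [List.min?_eq_some_iff]
    refine ⟨(hmem 'A').mpr ⟨by decide, hA⟩, ?_⟩
    intro b hb
    obtain ⟨h1, _⟩ := (hmem b).mp hb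
    fin_cases h1 <;> decide
  · rw [List.min?_eq_some_iff]
    refine ⟨(hmem 'B').mpr ⟨by decide, hB⟩, ?_⟩
    intro b hb
    obtain ⟨h1, h2⟩ := (hmem b).mp hb
    fin_cases h1 <;> first | exact absurd h2 hA | decide
  · rw [List.min?_eq_some_iff]
    refine ⟨(hmem 'C').mpr ⟨by decide, hC⟩, ?_⟩
    intro b hb
    obtain ⟨h1, h2⟩ := (hmem b).mp hb
    fin_cases h1 <;> first | exact absurd h2 hA | exact absurd h2 hB | decide
  · rw [List.min?_eq_some_iff]
    refine ⟨(hmem 'D').mpr ⟨by decide, hD⟩, ?_⟩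
    intro b hb
    obtain ⟨h1, h2⟩ := (hmem b).mp hb
    fin_cases h1 <;> first | exact absurd h2 hA | exact absurd h2 hB | exact absurd h2 hC | decide
  · rw [List.min?_eq_none_iff, List.eq_nil_iff_forall_not_mem]
    intro b hb
    obtain ⟨h1, h2⟩ := (hmem b).mp hb
    fin_cases h1 <;> first | exact absurd h2 hA | exact absurd h2 hB | exact absurd h2 hC | exact absurd h2 hD

-- A's fallback chain of four substring scans equals B's min-of-present-letters
lemma fallback_eq (cleaned : String) :
    (match ["A", "B", "C", "D"].find? (fun letter => PySem.Str.isIn letter cleaned) with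
     | some letter => letter
     | none => "B")
      = (match (PySem.Set.ofList
            (cleaned.toList.filter (fun c => PySem.Str.isIn (String.ofList [c]) "ABCD"))).min? with
         | some c => String.ofList [c]
         | none => "B") := by
  simp only [PySem.Str.isIn_eq, String.toList_ofList, String.reduceToList]
  rw [min_present]
  by_cases hA : 'A' ∈ cleaned.toList
  · simp [List.find?, isIn_single, hA]
  · by_cases hB : 'B' ∈ cleaned.toList
    · simp [List.find?, isIn_single, hA, hB]
    · by_cases hC : 'C' ∈ cleaned.toList
      · simp [List.find?, isIn_single, hA, hB, hC]
      · by_cases hD : 'D' ∈ cleaned.toList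
        · simp [List.find?, isIn_single, hA, hB, hC, hD]
        · simp [List.find?, isIn_single, hA, hB, hC, hD]

-- s[0:] is s (string level)
lemma str_slice_zero (s : String) : PySem.Str.slice s (some 0) none = s := by
  rw [← String.toList_inj]
  simp [PySem.Str.toList_slice]

-- A's rsplit-tail (guarded by rfind = -1) equals B's unconditional slice from rfind + 1
lemma tail_eq (cleaned : String) :
    (if PySem.Str.rfind cleaned "\n" == -1 then cleaned
     else PySem.Str.slice cleaned (some (PySem.Str.rfind cleaned "\n" + 1)) none)
      = PySem.Str.slice cleaned (some (PySem.Str.rfind cleaned "\n" + 1)) none := by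
  by_cases hi : PySem.Str.rfind cleaned "\n" = -1
  · rw [hi]; norm_num [str_slice_zero]
  · rw [beq_eq_false_iff_ne.mpr hi]
    simp only [Bool.false_eq_true, if_false]

-- ===== VERDICT (by name: the statement is the Claim_ definition above) =====
theorem parse_judge_grade_spec : Claim_equal_parse_judge_grade := by
  intro judge_text _
  unfold Spec_parse_judge_grade
  simp only [parse_judge_grade, parse_judge_grade_alt, pvLetters]
  rw [tail_eq]
  generalize PySem.Str.strip judge_text = cleaned
  generalize PySem.Str.strip
    (PySem.Str.slice cleaned (some (PySem.Str.rfind cleaned "\n" + 1)) none) = ll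
  rw [single_letter_eq cleaned, phase2_eq ll]
  cases hc1 : (PySem.Str.len cleaned == 1 && PySem.Str.isIn cleaned "ABCD") with
  | true =>
    rw [List.find?_cons_of_pos (p := fun cand => PySem.Str.len cand == 1 && PySem.Str.isIn cand "ABCD") (l := [ll]) hc1]
    simp
  | false =>
    rw [List.find?_cons_of_neg (p := fun cand => PySem.Str.len cand == 1 && PySem.Str.isIn cand "ABCD") (l := [ll]) (by rw [show ((fun cand => PySem.Str.len cand == 1 && PySem.Str.isIn cand "ABCD") cleaned) = (PySem.Str.len cleaned == 1 && PySem.Str.isIn cleaned "ABCD") from rfl, hc1]; exact Bool.false_ne_true)]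
    cases hc2 : (PySem.Str.len ll == 1 && PySem.Str.isIn ll "ABCD") with
    | true =>
      rw [List.find?_cons_of_pos (p := fun cand => PySem.Str.len cand == 1 && PySem.Str.isIn cand "ABCD") (l := []) hc2]
      simp
    | false =>
      rw [List.find?_cons_of_neg (p := fun cand => PySem.Str.len cand == 1 && PySem.Str.isIn cand "ABCD") (l := []) (by rw [show ((fun cand => PySem.Str.len cand == 1 && PySem.Str.isIn cand "ABCD") ll) = (PySem.Str.len ll == 1 && PySem.Str.isIn ll "ABCD") from rfl, hc2]; exact Bool.false_ne_true), List.find?_nil]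
      simp only [Bool.false_eq_true, if_false]
      exact fallback_eq cleaned
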